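-- pv_equiv track=rewrite | github.com/bif-voyager/labaPython | Основы программирования/laba3.py | ab_recursive
-- ===== SOURCE A (Python) =====
-- from typing import Any, List, Tuple
--
-- def ab_recursive(k: int) -> Tuple[int, int]:
--
--     if k < 1:
--         raise ValueError("k должно быть натуральным (k >= 1)")
--     if k == 1:
--         return 1, 1
--
--     a_prev, b_prev = ab_recursive(k - 1)
--     a_k = 2 * b_prev + a_prev
--     b_k = 2 * a_prev + b_prev
--     return a_k, b_k
-- ===== SOURCE B (Python) =====
-- def ab_recursive(k: int):
--     if k < 1:
--         raise ValueError("k должно быть натуральным (k >= 1)")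
--     p = 3 ** (k - 1)
--     return p, p
-- ===== Notes on version B (the rewrite author's own statement) =====
-- stated objective: faster
-- what changed: Replaced the linear recursion (a,b both stay equal and triple each step) with the closed form a = b = 3^(k-1) computed by built-in pow.
import Mathlib
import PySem

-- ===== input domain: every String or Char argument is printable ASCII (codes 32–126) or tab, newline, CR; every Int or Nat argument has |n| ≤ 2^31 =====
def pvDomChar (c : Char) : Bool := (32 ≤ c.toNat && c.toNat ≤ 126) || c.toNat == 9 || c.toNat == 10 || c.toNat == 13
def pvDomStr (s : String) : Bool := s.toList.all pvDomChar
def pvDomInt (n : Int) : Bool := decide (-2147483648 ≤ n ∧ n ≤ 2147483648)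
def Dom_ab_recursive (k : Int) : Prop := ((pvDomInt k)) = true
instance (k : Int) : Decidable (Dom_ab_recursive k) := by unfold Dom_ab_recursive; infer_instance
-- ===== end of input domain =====

-- B replaces A's O(k) recursion by the closed form a = b = 3^(k-1) (objective: faster, asymptotic).
-- Both versions raise ValueError for k < 1; those inputs are outside Pre_.

-- ===== PORT A =====
-- structural recursion on n = k - 1 (A recurses down to k = 1)
def abRecAux : Nat → Int × Int
  | 0 => (1, 1)
  | n + 1 =>
    let p := abRecAux n
    (2 * p.2 + p.1, 2 * p.1 + p.2)

def ab_recursive (k : Int) : Int × Int :=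
  if k < 1 then (0, 0)          -- A raises ValueError here; outside Pre_
  else if k = 1 then (1, 1)
  else abRecAux (k - 1).toNat

-- ===== PORT B =====
def ab_recursive_alt (k : Int) : Int × Int :=
  if k < 1 then (0, 0)          -- B raises ValueError here; outside Pre_
  else
    let p : Int := 3 ^ (k - 1).toNat
    (p, p)

-- ===== PRECONDITION & SPEC =====
-- Pre_ excludes k < 1, where both Pythons raise ValueError.
def Pre_ab_recursive (k : Int) : Prop := 1 ≤ k
instance (k : Int) : Decidable (Pre_ab_recursive k) := by unfold Pre_ab_recursive; infer_instance
def pvWitness_ab_recursive : Int := 4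

def Spec_ab_recursive (k : Int) (out : Int × Int) : Prop := out = ab_recursive_alt k
instance (k : Int) (out : Int × Int) : Decidable (Spec_ab_recursive k out) := by unfold Spec_ab_recursive; infer_instance

-- ===== CLAIM (what is proved, stated in full; the proofs are below) =====
def Claim_equal_ab_recursive : Prop := ∀ (k : Int), Dom_ab_recursive k → Pre_ab_recursive k → Spec_ab_recursive k (ab_recursive k)

-- ===== LEMMAS AND PROOFS =====
theorem abRecAux_eq_pow (n : Nat) : abRecAux n = ((3 : Int) ^ n, (3 : Int) ^ n) := by
  induction n with
  | zero => rfl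
  | succ m ih => simp [abRecAux, ih, pow_succ]; ring

-- ===== VERDICT (by name: the statement is the Claim_ definition above) =====
theorem ab_recursive_spec : Claim_equal_ab_recursive := by
  intro k _ hk
  unfold Spec_ab_recursive ab_recursive ab_recursive_alt
  have h1 : ¬ k < 1 := by unfold Pre_ab_recursive at hk; omega
  by_cases hk1 : k = 1
  · subst hk1; simp
  · simp [h1, hk1, abRecAux_eq_pow]
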